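-- pv_equiv track=rewrite | github.com/NgenoMark/Service-Monitor | monitoring/postgres/populator/python/populate.py | is_expected_http_status
-- ===== SOURCE A (Python) =====
-- def parse_expected_status_codes(spec: str):
--     tokens = (spec or "200-399").replace(" ", "").split(",")
--     exact = set()
--     ranges = []
--
--     for token in tokens:
--         if not token:
--             continue
--         if "-" in token:
--             start_text, end_text = token.split("-", 1)
--             try:
--                 start = int(start_text)
--                 end = int(end_text)
--             except ValueError:
--                 continue
--             if start > end:
--                 start, end = end, start
--             ranges.append((start, end))
--         else:
--             try:
--                 exact.add(int(token))
--             except ValueError: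
--                 continue
--
--     if not exact and not ranges:
--         ranges.append((200, 399))
--
--     return exact, ranges
--
-- def is_expected_http_status(code: int, expected_spec: str) -> bool:
--     exact, ranges = parse_expected_status_codes(expected_spec)
--     if code in exact:
--         return True
--     for start, end in ranges:
--         if start <= code <= end:
--             return True
--     return False
-- ===== SOURCE B (Python) =====
-- def is_expected_http_status(code: int, expected_spec: str) -> bool:
--     found_valid = False
--     for token in (expected_spec or "200-399").replace(" ", "").split(","):
--         if not token:
--             continue
--         if "-" in token:
--             start_text, end_text = token.split("-", 1)
--             try:
--                 start = int(start_text)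
--                 end = int(end_text)
--             except ValueError:
--                 continue
--             found_valid = True
--             if start > end:
--                 start, end = end, start
--             if start <= code <= end:
--                 return True
--         else:
--             try:
--                 value = int(token)
--             except ValueError:
--                 continue
--             found_valid = True
--             if value == code:
--                 return True
--     if not found_valid:
--         return 200 <= code <= 399
--     return False
-- ===== Notes on version B (the rewrite author's own statement) =====
-- stated objective: simpler
-- what changed: B fuses parsing and matching into one short-circuiting pass over the tokens with a found_valid flag, instead of A's two-phase build of an exact-set plus range-list that is then scanned; no intermediate collections are allocated.
import Mathlib
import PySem

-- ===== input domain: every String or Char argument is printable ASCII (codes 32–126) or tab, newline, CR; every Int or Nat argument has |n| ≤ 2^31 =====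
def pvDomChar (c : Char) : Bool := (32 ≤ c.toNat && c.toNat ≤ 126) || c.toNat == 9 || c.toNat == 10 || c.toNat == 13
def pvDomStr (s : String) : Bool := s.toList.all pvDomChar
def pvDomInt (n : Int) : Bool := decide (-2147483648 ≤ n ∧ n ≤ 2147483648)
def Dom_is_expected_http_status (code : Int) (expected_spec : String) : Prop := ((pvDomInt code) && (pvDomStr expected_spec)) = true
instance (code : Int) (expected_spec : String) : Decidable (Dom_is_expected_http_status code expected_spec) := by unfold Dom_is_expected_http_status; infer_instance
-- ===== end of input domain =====

-- B replaces A's two-phase parse-then-scan (building an exact-set and a range list) by one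
-- short-circuiting pass over the tokens with a found_valid flag (objective: simpler).

-- ===== PORT A =====
-- loop body of A's helper parse_expected_status_codes
def pvStepA (st : PySem.Set Int × List (Int × Int)) (token : List Char) :
    PySem.Set Int × List (Int × Int) :=
  if token = [] then st
  else if PySem.Chars.isIn ['-'] token then
    match PySem.Chars.splitOnMax token ['-'] 1 with
    | [startText, endText] =>
      match PySem.Int.ofChars? startText, PySem.Int.ofChars? endText with
      | some s, some e =>
        if s > e then (st.1, st.2 ++ [(e, s)]) else (st.1, st.2 ++ [(s, e)])
      | _, _ => st
    | _ => st  -- unreachable: split('-',1) with '-' present yields two parts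
  else
    match PySem.Int.ofChars? token with
    | some v => (PySem.Set.add st.1 v, st.2)
    | none => st

def parse_expected_status_codes (spec : String) : PySem.Set Int × List (Int × Int) :=
  let tokens := PySem.Chars.splitOn
    (PySem.Chars.replace (if spec.toList = [] then "200-399".toList else spec.toList) [' '] []) [',']
  let p := tokens.foldl pvStepA (PySem.Set.empty, ([] : List (Int × Int)))
  if p.1 = [] ∧ p.2 = [] then (p.1, p.2 ++ [(200, 399)]) else p

def is_expected_http_status (code : Int) (expected_spec : String) : Bool :=
  let p := parse_expected_status_codes expected_spec
  if PySem.Set.contains p.1 code then true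
  else p.2.any (fun q => decide (q.1 ≤ code ∧ code ≤ q.2))

-- ===== PORT B =====
-- B's for-loop over the tokens, with the found_valid flag
def pvAltLoop (code : Int) : List (List Char) → Bool → Bool
  | [], found => if !found then decide (200 ≤ code ∧ code ≤ 399) else false
  | t :: rest, found =>
    if t = [] then pvAltLoop code rest found
    else if PySem.Chars.isIn ['-'] t then
      match PySem.Chars.splitOnMax t ['-'] 1 with
      | [startText, endText] =>
        match PySem.Int.ofChars? startText, PySem.Int.ofChars? endText with
        | some s, some e =>
          let p := if s > e then (e, s) else (s, e)
          if p.1 ≤ code ∧ code ≤ p.2 then true else pvAltLoop code rest true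
        | _, _ => pvAltLoop code rest found
      | _ => pvAltLoop code rest found
    else
      match PySem.Int.ofChars? t with
      | some v => if v == code then true else pvAltLoop code rest true
      | none => pvAltLoop code rest found

def is_expected_http_status_alt (code : Int) (expected_spec : String) : Bool :=
  pvAltLoop code
    (PySem.Chars.splitOn
      (PySem.Chars.replace (if expected_spec.toList = [] then "200-399".toList else expected_spec.toList) [' '] []) [','])
    false

-- ===== PRECONDITION & SPEC =====
def Spec_is_expected_http_status (code : Int) (expected_spec : String) (out : Bool) : Prop := out = is_expected_http_status_alt code expected_spec
instance (code : Int) (expected_spec : String) (out : Bool) : Decidable (Spec_is_expected_http_status code expected_spec out) := by unfold Spec_is_expected_http_status; infer_instance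

-- ===== CLAIM (what is proved, stated in full; the proofs are below) =====
def Claim_equal_is_expected_http_status : Prop := ∀ (code : Int) (expected_spec : String), Dom_is_expected_http_status code expected_spec → Spec_is_expected_http_status code expected_spec (is_expected_http_status code expected_spec)

-- ===== LEMMAS AND PROOFS =====

-- a token either is skipped (none), parses as an exact code, or as a normalized range
def pvTok (t : List Char) : Option (Int ⊕ (Int × Int)) :=
  if t = [] then none
  else if PySem.Chars.isIn ['-'] t then
    match PySem.Chars.splitOnMax t ['-'] 1 with
    | [a, b] =>
      match PySem.Int.ofChars? a, PySem.Int.ofChars? b with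
      | some s, some e => if s > e then some (.inr (e, s)) else some (.inr (s, e))
      | _, _ => none
    | _ => none
  else (PySem.Int.ofChars? t).map .inl

-- A's final membership test, including the default-range fallback
def pvCheckA (code : Int) (p : PySem.Set Int × List (Int × Int)) : Bool :=
  let p2 := if p.1 = [] ∧ p.2 = [] then (p.1, p.2 ++ [(200, 399)]) else p
  if PySem.Set.contains p2.1 code then true
  else p2.2.any (fun q => decide (q.1 ≤ code ∧ code ≤ q.2))

lemma pvStepA_eq (st : PySem.Set Int × List (Int × Int)) (t : List Char) :
    pvStepA st t = match pvTok t with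
      | none => st
      | some (.inl v) => (PySem.Set.add st.1 v, st.2)
      | some (.inr p) => (st.1, st.2 ++ [p]) := by
  unfold pvStepA pvTok
  by_cases ht : t = []
  · simp [ht]
  · simp only [if_neg ht]
    by_cases hin : PySem.Chars.isIn ['-'] t = true
    · simp only [if_pos hin]
      cases hsp : PySem.Chars.splitOnMax t ['-'] 1 with
      | nil => simp
      | cons a l =>
        cases l with
        | nil => simp
        | cons b l2 =>
          cases l2 with
          | nil =>
            cases ha : PySem.Int.ofChars? a with
            | none => simp [ha]
            | some s =>
              cases hb : PySem.Int.ofChars? b with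
              | none => simp [ha, hb]
              | some e => by_cases hse : s > e <;> simp [ha, hb, hse]
          | cons c l3 => simp
    · simp only [if_neg hin]
      cases hv : PySem.Int.ofChars? t <;> simp

lemma pvAltLoop_cons (code : Int) (t : List Char) (rest : List (List Char)) (found : Bool) :
    pvAltLoop code (t :: rest) found = match pvTok t with
      | none => pvAltLoop code rest found
      | some (.inl v) => if v == code then true else pvAltLoop code rest true
      | some (.inr p) => if p.1 ≤ code ∧ code ≤ p.2 then true else pvAltLoop code rest true := by
  rw [pvAltLoop]
  unfold pvTok
  by_cases ht : t = []
  · simp [ht]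
  · simp only [if_neg ht]
    by_cases hin : PySem.Chars.isIn ['-'] t = true
    · simp only [if_pos hin]
      cases hsp : PySem.Chars.splitOnMax t ['-'] 1 with
      | nil => simp
      | cons a l =>
        cases l with
        | nil => simp
        | cons b l2 =>
          cases l2 with
          | nil =>
            cases ha : PySem.Int.ofChars? a with
            | none => simp [ha]
            | some s =>
              cases hb : PySem.Int.ofChars? b with
              | none => simp [ha, hb]
              | some e => by_cases hse : s > e <;> simp [ha, hb, hse]
          | cons c l3 => simp
    · simp only [if_neg hin]
      cases hv : PySem.Int.ofChars? t <;> simp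

lemma pv_contains_add (s : PySem.Set Int) (v x : Int) :
    PySem.Set.contains (PySem.Set.add s v) x = (PySem.Set.contains s x || x == v) := by
  rw [PySem.Set.add_eq_ite]
  by_cases hv : v ∈ s
  · simp only [if_pos hv]
    by_cases hx : x = v
    · subst hx; simp [PySem.Set.contains_eq_listContains, hv]
    · simp [hx]
  · by_cases hx : x = v <;> simp [if_neg hv, hx, PySem.Set.contains_eq_listContains]

lemma pv_add_ne_nil (s : PySem.Set Int) (v : Int) : PySem.Set.add s v ≠ [] := by
  rw [PySem.Set.add_eq_ite]
  split
  · rename_i h; intro hnil; subst hnil; simp at h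
  · simp

-- invariant of the fused loop: checking A's final state equals B's remaining loop
lemma pv_main (code : Int) (ts : List (List Char)) :
    ∀ (e : PySem.Set Int) (r : List (Int × Int)),
    pvCheckA code (ts.foldl pvStepA (e, r))
    = (PySem.Set.contains e code
       || r.any (fun q => decide (q.1 ≤ code ∧ code ≤ q.2))
       || pvAltLoop code ts (!decide (e = [] ∧ r = []))) := by
  induction ts with
  | nil =>
    intro e r
    rw [List.foldl_nil, pvAltLoop]
    unfold pvCheckA
    by_cases h : e = [] ∧ r = []
    · obtain ⟨he, hr⟩ := h
      subst he; subst hr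
      simp [PySem.Set.contains_eq_listContains]
    · simp only [h, decide_false, Bool.not_false, ite_false]
      cases hc : PySem.Set.contains e code <;> simp
  | cons t rest ih =>
    intro e r
    rw [List.foldl_cons, pvStepA_eq, pvAltLoop_cons]
    cases htk : pvTok t with
    | none => exact ih e r
    | some sv =>
      cases sv with
      | inl v =>
        show pvCheckA code (rest.foldl pvStepA (PySem.Set.add e v, r)) = _
        rw [ih (PySem.Set.add e v) r]
        have hflag : (!decide (PySem.Set.add e v = [] ∧ r = [])) = true := by
          simp [pv_add_ne_nil e v]
        rw [hflag, pv_contains_add]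
        by_cases hvc : v = code
        · subst hvc; simp
        · have h1 : (code == v) = false := by simp [Ne.symm hvc]
          have h2 : (v == code) = false := by simp [hvc]
          simp [h1, h2, Bool.or_assoc]
      | inr p =>
        show pvCheckA code (rest.foldl pvStepA (e, r ++ [p])) = _
        rw [ih e (r ++ [p])]
        have hflag : (!decide (e = [] ∧ r ++ [p] = [])) = true := by simp
        rw [hflag]
        by_cases hpq : p.1 ≤ code ∧ code ≤ p.2
        · obtain ⟨h1, h2⟩ := hpq
          simp [List.any_append, h1, h2]
        · have hfalse : (decide (p.1 ≤ code) && decide (code ≤ p.2)) = false := by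
            by_cases h1 : p.1 ≤ code
            · have h2 : ¬ code ≤ p.2 := fun h2 => hpq ⟨h1, h2⟩
              simp [h2]
            · simp [h1]
          simp [List.any_append, hfalse, hpq, Bool.or_assoc]

-- ===== VERDICT (by name: the statement is the Claim_ definition above) =====
theorem is_expected_http_status_spec : Claim_equal_is_expected_http_status := by
  intro code spec _
  unfold Spec_is_expected_http_status is_expected_http_status parse_expected_status_codes
    is_expected_http_status_alt
  have := pv_main code
    (PySem.Chars.splitOn
      (PySem.Chars.replace (if spec.toList = [] then "200-399".toList else spec.toList) [' '] []) [','])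
    PySem.Set.empty []
  unfold pvCheckA at this
  simpa [PySem.Set.empty, PySem.Set.contains_eq_listContains] using this
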